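-- pv_equiv track=rewrite | github.com/SaltyPeppermint/captici-orchestrator | cdpb_test_orchestrator/cdpb_testing/selection/commits.py | choose_middle
-- ===== SOURCE A (Python) =====
-- def choose_middle(left_bounding_item, right_bounding_item, items):
--     ix = iy = 0
--     for i, v in enumerate(items):
--         if v == left_bounding_item:
--             ix = i
--         if v == right_bounding_item:
--             iy = i
--             break
--
--     items_in_window = items[ix:iy]
--     middle_item = items_in_window[len(items_in_window) // 2]
--     # // is division without remainder, perfect here
--
--     return middle_item
-- ===== SOURCE B (Python) =====
-- def choose_middle(left_bounding_item, right_bounding_item, items):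
--     # Two separate passes: first locate the break point iy (first occurrence of the
--     # right bound, 0 if absent), then scan indices iy..0 backwards for the nearest
--     # occurrence of the left bound at or before iy.
--     iy = items.index(right_bounding_item) if right_bounding_item in items else 0
--     ix = next((i for i in range(iy, -1, -1) if items[i] == left_bounding_item), 0)
--     window = items[ix:iy]
--     return window[len(window) // 2]
-- ===== Notes on version B (the rewrite author's own statement) =====
-- stated objective: alternative
-- what changed: Replaced the single interleaved forward pass (tracking both bounds with a break) by two independent searches: list.index/'in' for the first occurrence of the right bound, then a backward scan from that point for the nearest left bound.
import Mathlib
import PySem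

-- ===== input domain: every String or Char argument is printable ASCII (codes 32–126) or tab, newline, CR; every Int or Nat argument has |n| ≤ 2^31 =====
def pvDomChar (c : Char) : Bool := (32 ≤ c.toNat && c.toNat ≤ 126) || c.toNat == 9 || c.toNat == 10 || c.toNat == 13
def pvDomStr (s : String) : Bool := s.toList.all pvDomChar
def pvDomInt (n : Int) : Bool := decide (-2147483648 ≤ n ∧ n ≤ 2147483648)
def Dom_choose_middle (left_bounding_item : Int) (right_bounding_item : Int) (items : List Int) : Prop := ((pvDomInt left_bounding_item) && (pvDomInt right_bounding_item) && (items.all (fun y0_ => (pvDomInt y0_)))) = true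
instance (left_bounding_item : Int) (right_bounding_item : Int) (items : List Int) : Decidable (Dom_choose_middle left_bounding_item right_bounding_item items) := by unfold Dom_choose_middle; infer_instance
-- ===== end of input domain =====

-- B replaces A's single interleaved forward pass by two independent searches
-- (first occurrence of the right bound, then a backward scan for the left bound);
-- equivalence is proved on Pre_, exactly the inputs where A returns (both raise elsewhere).

-- ===== PORT A =====
-- 'for i, v in enumerate(items): …' with a break, carried as (index i, accumulator ix);
-- returns (ix, iy) at the break or at the loop's end (iy keeps its initial 0 if no break).
def pvLoopA (l r : Int) : List Int → Nat → Nat → Nat × Nat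
  | [], _, ix => (ix, 0)
  | v :: rest, i, ix =>
      let ix' := if v = l then i else ix
      if v = r then (ix', i) else pvLoopA l r rest (i + 1) ix'

def choose_middle (left_bounding_item : Int) (right_bounding_item : Int) (items : List Int) : Int :=
  let p := pvLoopA left_bounding_item right_bounding_item items 0 0
  let items_in_window := PySem.List.slice items (some (p.1 : Int)) (some (p.2 : Int))
  -- items_in_window[len // 2]: pyGet? is none exactly where Python raises IndexError (outside Pre_)
  (PySem.List.pyGet? items_in_window (PySem.Int.floordiv (items_in_window.length : Int) 2)).getD 0

-- ===== PORT B =====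
def choose_middle_alt (left_bounding_item : Int) (right_bounding_item : Int) (items : List Int) : Int :=
  -- iy = items.index(right) if right in items else 0
  let iy : Nat := (PySem.List.index? items right_bounding_item).getD 0
  -- ix = next((i for i in range(iy, -1, -1) if items[i] == left), 0);
  -- items[i] is in range for every i in 0..iy whenever right ∈ items (all of Pre_), so .getD 0 is exact there
  let ix : Int := ((PySem.List.pyRange (iy : Int) (-1) (-1)).find?
      (fun i => (PySem.List.pyGet? items i).getD 0 == left_bounding_item)).getD 0
  let window := PySem.List.slice items (some ix) (some (iy : Int))
  (PySem.List.pyGet? window (PySem.Int.floordiv (window.length : Int) 2)).getD 0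

-- ===== PRECONDITION & SPEC =====
-- Pre_ is exactly where A returns: with the first item equal to the right bound, the right bound
-- absent, or left = right, A's window items[ix:iy] is empty and A raises IndexError (B raises too).
def Pre_choose_middle (left_bounding_item : Int) (right_bounding_item : Int) (items : List Int) : Prop :=
  left_bounding_item ≠ right_bounding_item ∧ items.head? ≠ some right_bounding_item ∧ right_bounding_item ∈ items.drop 1

instance (left_bounding_item : Int) (right_bounding_item : Int) (items : List Int) : Decidable (Pre_choose_middle left_bounding_item right_bounding_item items) := by unfold Pre_choose_middle; infer_instance

def pvWitness_choose_middle : Int × Int × List Int := (1, 5, [0, 1, 3, 4, 5, 9])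

def Spec_choose_middle (left_bounding_item : Int) (right_bounding_item : Int) (items : List Int) (out : Int) : Prop := out = choose_middle_alt left_bounding_item right_bounding_item items
instance (left_bounding_item : Int) (right_bounding_item : Int) (items : List Int) (out : Int) : Decidable (Spec_choose_middle left_bounding_item right_bounding_item items out) := by unfold Spec_choose_middle; infer_instance

-- ===== CLAIM (what is proved, stated in full; the proofs are below) =====
def Claim_equal_choose_middle : Prop := ∀ (left_bounding_item : Int) (right_bounding_item : Int) (items : List Int), Dom_choose_middle left_bounding_item right_bounding_item items → Pre_choose_middle left_bounding_item right_bounding_item items → Spec_choose_middle left_bounding_item right_bounding_item items (choose_middle left_bounding_item right_bounding_item items)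

-- ===== LEMMAS AND PROOFS =====

-- last index of v in xs (the common characterisation both searches are reduced to)
def pvLastIdx? (v : Int) : List Int → Option Nat
  | [] => none
  | x :: xs =>
      match pvLastIdx? v xs with
      | some k => some (k + 1)
      | none => if x = v then some 0 else none

def pvOptIdx (o : Option Nat) (i ix : Nat) : Nat :=
  match o with
  | some k => i + k
  | none => ix

lemma pvLastIdx?_append_singleton (v x : Int) (ys : List Int) :
    pvLastIdx? v (ys ++ [x]) = if x = v then some ys.length else pvLastIdx? v ys := by
  induction ys with
  | nil => simp [pvLastIdx?]
  | cons y ys ih =>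
      simp only [List.cons_append, pvLastIdx?, ih]
      split_ifs <;> simp

lemma pvLoopA_spec (l r : Int) (xs : List Int) (i ix : Nat) :
    pvLoopA l r xs i ix =
      match PySem.List.index? xs r with
      | some j => (pvOptIdx (pvLastIdx? l (xs.take (j + 1))) i ix, i + j)
      | none => (pvOptIdx (pvLastIdx? l xs) i ix, 0) := by
  induction xs generalizing i ix with
  | nil => simp [pvLoopA, pvLastIdx?, pvOptIdx, PySem.List.index?]
  | cons x xs ih =>
      by_cases hr : x = r
      · subst hr
        rw [PySem.List.index?_cons_self]
        simp only [pvLoopA, List.take_succ_cons, List.take_zero]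
        by_cases hl : x = l <;> simp [hl, pvLastIdx?, pvOptIdx]
      · rw [PySem.List.index?_cons_of_ne xs hr]
        simp only [pvLoopA, if_neg hr]
        rw [ih]
        cases hidx : PySem.List.index? xs r with
        | none =>
            simp only [Option.map_none]
            by_cases hl : x = l <;>
              simp only [pvLastIdx?, hl, if_pos] <;>
              cases htail : pvLastIdx? l xs <;> simp [pvOptIdx] <;> omega
        | some j =>
            simp only [Option.map_some, List.take_succ_cons]
            by_cases hl : x = l <;>
              simp only [pvLastIdx?, hl, if_pos] <;>
              cases htail : pvLastIdx? l (xs.take (j + 1)) <;>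
                simp [pvOptIdx] <;> omega

lemma pvBackScan_spec (l : Int) (xs : List Int) (j : Nat) (hj : j < xs.length) :
    ((PySem.List.pyRange (j : Int) (-1) (-1)).find?
        (fun i => (PySem.List.pyGet? xs i).getD 0 == l)).getD 0
      = ((pvLastIdx? l (xs.take (j + 1))).getD 0 : Nat) := by
  induction j with
  | zero =>
      have h0 : 0 < xs.length := hj
      have hrange : PySem.List.pyRange (0 : Int) (-1) (-1) = [0] := by
        rw [PySem.List.pyRange_neg_one_cons (by norm_num), PySem.List.pyRange_neg_one_eq_nil (by norm_num)]
      have htake : xs.take 1 = [xs[0]] := by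
        cases xs with
        | nil => simp at h0
        | cons a t => simp
      have hget : PySem.List.pyGet? xs (0 : Int) = some xs[0] := by
        rw [PySem.List.pyGet?_zero, List.getElem?_eq_getElem h0]
      simp only [Nat.cast_zero, Nat.zero_add]
      rw [hrange, htake]
      by_cases hl : xs[0] = l
      · rw [List.find?_cons_of_pos (by simp [hget, hl])]
        simp [pvLastIdx?, hl]
      · rw [List.find?_cons_of_neg (by simp [hget, hl])]
        simp [pvLastIdx?, hl]
  | succ j ih =>
      have hj' : j < xs.length := Nat.lt_of_succ_lt hj
      have hsub : ((j + 1 : Nat) : Int) - 1 = (j : Int) := by push_cast; ring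
      have hcons : PySem.List.pyRange ((j + 1 : Nat) : Int) (-1) (-1)
          = ((j + 1 : Nat) : Int) :: PySem.List.pyRange ((j : Nat) : Int) (-1) (-1) := by
        rw [PySem.List.pyRange_neg_one_cons (by omega), hsub]
      have htake : xs.take (j + 2) = xs.take (j + 1) ++ [xs[j + 1]] := by
        rw [List.take_add_one, List.getElem?_eq_getElem hj]
        rfl
      have hget : PySem.List.pyGet? xs ((j + 1 : Nat) : Int) = some xs[j + 1] := by
        rw [PySem.List.pyGet?_natCast, List.getElem?_eq_getElem hj]
      have hget' : PySem.List.pyGet? xs ((j : Int) + 1) = some xs[j + 1] := by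
        push_cast at hget; exact hget
      rw [hcons, htake, pvLastIdx?_append_singleton]
      by_cases hl : xs[j + 1] = l
      · have hlen : (xs.take (j + 1)).length = j + 1 := List.length_take_of_le (by omega)
        rw [List.find?_cons_of_pos (by simp [hget', hl])]
        simp [hl, hlen]
      · rw [List.find?_cons_of_neg (by simp [hget', hl])]
        simpa [hl] using ih hj'

theorem choose_middle_spec : Claim_equal_choose_middle := by
  intro l r items _hdom hpre
  unfold Spec_choose_middle
  cases items with
  | nil => exact absurd hpre.2.2 (by simp)
  | cons h t =>
      obtain ⟨hlr, hhr, hrt⟩ := hpre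
      have hrt : r ∈ t := by simpa using hrt
      have hmem : r ∈ h :: t := List.mem_cons_of_mem _ hrt
      have hsome : (PySem.List.index? (h :: t) r).isSome :=
        (PySem.List.index?_isSome_iff (h :: t) r).2 hmem
      obtain ⟨j, hj⟩ := Option.isSome_iff_exists.1 hsome
      obtain ⟨hjlt, _hjval, _⟩ := PySem.List.getElem_of_index?_eq_some hj
      have hopt : pvOptIdx (pvLastIdx? l ((h :: t).take (j + 1))) 0 0
          = (pvLastIdx? l ((h :: t).take (j + 1))).getD 0 := by
        cases pvLastIdx? l ((h :: t).take (j + 1)) <;> simp [pvOptIdx]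
      simp only [choose_middle, choose_middle_alt, pvLoopA_spec, hj, Option.getD_some,
        pvBackScan_spec l (h :: t) j hjlt, hopt, Nat.zero_add]
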